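-- pv_equiv track=rewrite | github.com/yangyang045200/LUNa-seq | LUNa_seq/scripts/raw_data_classification.py | longest_contiguous_len
-- ===== SOURCE A (Python) =====
-- def longest_contiguous_len(cigartuples, indel_tol: int) -> int:
--     """
--     Compute the longest contiguous aligned segment length on the reference,
--     allowing small I/D (<= indel_tol) to be tolerated inside the segment.
--     """
--     if not cigartuples:
--         return 0
--     longest = 0
--     current = 0
--     for op, length in cigartuples:
--         if op == 0:  # M
--             current += length
--         elif op in (1, 2) and length <= indel_tol:  # small I/D tolerated
--             # Only D consumes reference; we keep the original behavior that treats both as contiguous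
--             current += length
--         elif op in (4, 5):  # S/H clipping ignored
--             continue
--         else:
--             current = 0
--         if current > longest:
--             longest = current
--     return longest
-- ===== SOURCE B (Python) =====
-- def _max_prefix(seg):
--     """Largest prefix sum of seg, floored at 0 (empty prefix counts)."""
--     s = 0
--     m = 0
--     for x in seg:
--         s += x
--         if s > m:
--             m = s
--     return m
--
--
-- def longest_contiguous_len(cigartuples, indel_tol: int) -> int:
--     # Phase 1: partition the ops into maximal tolerated runs of increments.
--     segments = []
--     cur = []
--     for op, length in cigartuples:
--         if op == 0 or (op in (1, 2) and length <= indel_tol):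
--             cur.append(length)
--         elif op in (4, 5):  # clipping: contributes nothing, does not break the run
--             continue
--         else:
--             segments.append(cur)
--             cur = []
--     segments.append(cur)
--     # Phase 2: reduce each run to its best prefix, take the overall best.
--     return max(_max_prefix(seg) for seg in segments)
-- ===== Notes on version B (the rewrite author's own statement) =====
-- stated objective: alternative
-- what changed: B first partitions the cigar ops into maximal tolerated runs of increments (clips skipped, other ops closing a run), then reduces each run to its best prefix sum and takes the maximum over runs, instead of threading a running max through a single loop.
import Mathlib
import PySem

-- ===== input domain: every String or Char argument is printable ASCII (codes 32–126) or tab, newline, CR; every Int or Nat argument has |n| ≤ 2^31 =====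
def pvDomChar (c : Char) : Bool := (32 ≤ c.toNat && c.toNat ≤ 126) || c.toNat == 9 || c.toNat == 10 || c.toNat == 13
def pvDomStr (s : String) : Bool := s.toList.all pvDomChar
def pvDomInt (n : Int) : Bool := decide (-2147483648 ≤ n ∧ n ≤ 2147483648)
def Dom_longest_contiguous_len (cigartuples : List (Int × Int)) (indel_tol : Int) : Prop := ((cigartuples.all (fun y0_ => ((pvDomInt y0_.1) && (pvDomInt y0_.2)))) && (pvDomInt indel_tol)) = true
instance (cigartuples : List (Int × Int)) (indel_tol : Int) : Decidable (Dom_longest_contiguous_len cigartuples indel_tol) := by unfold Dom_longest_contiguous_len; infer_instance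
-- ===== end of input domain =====

-- B partitions the cigar ops into maximal tolerated runs and reduces each run to
-- its best prefix sum, instead of threading a running max through one loop
-- (alternative decomposition, same cost); return values proved equal on all inputs.


-- ===== PORT A =====
-- loop body of A: state is (longest, current)
def pvStepA (indel_tol : Int) (p : Int × Int) (t : Int × Int) : Int × Int :=
  if t.1 = 0 then
    let c := p.2 + t.2
    (if c > p.1 then c else p.1, c)
  else if (t.1 = 1 ∨ t.1 = 2) ∧ t.2 ≤ indel_tol then
    let c := p.2 + t.2
    (if c > p.1 then c else p.1, c)
  else if t.1 = 4 ∨ t.1 = 5 then p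
  else (if (0 : Int) > p.1 then 0 else p.1, 0)

def longest_contiguous_len (cigartuples : List (Int × Int)) (indel_tol : Int) : Int :=
  if cigartuples = [] then 0
  else (cigartuples.foldl (pvStepA indel_tol) (0, 0)).1

-- ===== PORT B =====
-- _max_prefix: largest prefix sum of seg, floored at 0; state is (s, m)
def pvMaxPrefix (seg : List Int) : Int :=
  (seg.foldl (fun (p : Int × Int) x =>
    (p.1 + x, if p.1 + x > p.2 then p.1 + x else p.2)) (0, 0)).2

-- phase-1 loop body of B: state is (segments, cur)
def pvStepB (indel_tol : Int) (p : List (List Int) × List Int) (t : Int × Int) :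
    List (List Int) × List Int :=
  if t.1 = 0 ∨ ((t.1 = 1 ∨ t.1 = 2) ∧ t.2 ≤ indel_tol) then (p.1, p.2 ++ [t.2])
  else if t.1 = 4 ∨ t.1 = 5 then p
  else (p.1 ++ [p.2], [])

-- Python's max over a nonempty list (the [] case is unreachable in B)
def pvPyMax (l : List Int) : Int :=
  match l with
  | [] => 0
  | h :: t => t.foldl max h

def longest_contiguous_len_alt (cigartuples : List (Int × Int)) (indel_tol : Int) : Int :=
  let st := cigartuples.foldl (pvStepB indel_tol) ([], [])
  pvPyMax ((st.1 ++ [st.2]).map pvMaxPrefix)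

-- ===== PRECONDITION & SPEC =====
def Spec_longest_contiguous_len (cigartuples : List (Int × Int)) (indel_tol : Int) (out : Int) : Prop := out = longest_contiguous_len_alt cigartuples indel_tol
instance (cigartuples : List (Int × Int)) (indel_tol : Int) (out : Int) : Decidable (Spec_longest_contiguous_len cigartuples indel_tol out) := by unfold Spec_longest_contiguous_len; infer_instance

-- ===== CLAIM (what is proved, stated in full; the proofs are below) =====
def Claim_equal_longest_contiguous_len : Prop := ∀ (cigartuples : List (Int × Int)) (indel_tol : Int), Dom_longest_contiguous_len cigartuples indel_tol → Spec_longest_contiguous_len cigartuples indel_tol (longest_contiguous_len cigartuples indel_tol)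

-- ===== LEMMAS AND PROOFS =====

-- the running first component of pvMaxPrefix's fold is the sum
theorem pvMaxPrefix_fst (seg : List Int) (s m : Int) :
    (seg.foldl (fun (p : Int × Int) x =>
      (p.1 + x, if p.1 + x > p.2 then p.1 + x else p.2)) (s, m)).1 = s + seg.sum := by
  induction seg generalizing s m with
  | nil => simp
  | cons y ys ih => simp [ih]; ring

-- the running max never decreases
theorem pvMaxPrefix_mono (seg : List Int) (s m : Int) :
    m ≤ (seg.foldl (fun (p : Int × Int) x =>
      (p.1 + x, if p.1 + x > p.2 then p.1 + x else p.2)) (s, m)).2 := by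
  induction seg generalizing s m with
  | nil => simp
  | cons y ys ih =>
    simp only [List.foldl_cons]
    refine le_trans ?_ (ih (s + y) _)
    split <;> omega

theorem pvMaxPrefix_nonneg (seg : List Int) : 0 ≤ pvMaxPrefix seg :=
  pvMaxPrefix_mono seg 0 0

theorem pvMaxPrefix_append_one (seg : List Int) (x : Int) :
    pvMaxPrefix (seg ++ [x]) = max (pvMaxPrefix seg) (seg.sum + x) := by
  unfold pvMaxPrefix
  rw [List.foldl_append]
  simp only [List.foldl_cons, List.foldl_nil]
  rw [pvMaxPrefix_fst]
  simp only [zero_add]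
  split <;> omega

theorem foldl_max_zero_append (l : List Int) (x : Int) :
    (l ++ [x]).foldl max 0 = max (l.foldl max 0) x := by
  rw [List.foldl_append]; simp

-- loop invariant: A's (longest, current) is determined by B's (segments, cur)
theorem loop_inv (cig : List (Int × Int)) (tol : Int) :
    ∀ (done : List (List Int)) (cur : List Int) (L c : Int),
    0 ≤ L → c = cur.sum →
    L = max (((done.map pvMaxPrefix).foldl max 0)) (pvMaxPrefix cur) →
    (cig.foldl (pvStepA tol) (L, c)).1 =
      pvPyMax ((((cig.foldl (pvStepB tol) (done, cur)).1 ++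
        [(cig.foldl (pvStepB tol) (done, cur)).2]).map pvMaxPrefix)) := by
  induction cig with
  | nil =>
    intro done cur L c hL hc hinv
    simp only [List.foldl_nil]
    rw [List.map_append]
    cases hd : done.map pvMaxPrefix with
    | nil =>
      simp [pvPyMax, hinv, hd]
      have := pvMaxPrefix_nonneg cur
      omega
    | cons h t =>
      have hh : 0 ≤ h := by
        have : h ∈ done.map pvMaxPrefix := by rw [hd]; exact List.mem_cons_self
        obtain ⟨s, _, hs⟩ := List.mem_map.mp this
        rw [← hs]; exact pvMaxPrefix_nonneg s
      simp only [List.map_cons, List.map_nil, List.cons_append, pvPyMax]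
      rw [List.foldl_append]
      simp only [List.foldl_cons, List.foldl_nil]
      rw [hd] at hinv
      simp only [List.foldl_cons] at hinv
      rw [max_eq_right hh] at hinv
      exact hinv
  | cons p rest ih =>
    intro done cur L c hL hc hinv
    simp only [List.foldl_cons]
    by_cases h0 : p.1 = 0
    · -- A takes the M branch; B takes the add branch
      rw [show pvStepA tol (L, c) p =
          (if c + p.2 > L then c + p.2 else L, c + p.2) by simp [pvStepA, h0],
        show pvStepB tol (done, cur) p = (done, cur ++ [p.2]) by simp [pvStepB, h0]]
      apply ih
      · split <;> omega
      · simp [hc]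
      · rw [pvMaxPrefix_append_one, ← hc]
        split <;> omega
    · by_cases h12 : (p.1 = 1 ∨ p.1 = 2) ∧ p.2 ≤ tol
      · rw [show pvStepA tol (L, c) p =
            (if c + p.2 > L then c + p.2 else L, c + p.2) by
              simp [pvStepA, h0, h12],
          show pvStepB tol (done, cur) p = (done, cur ++ [p.2]) by
              simp [pvStepB, h0, h12]]
        apply ih
        · split <;> omega
        · simp [hc]
        · rw [pvMaxPrefix_append_one, ← hc]
          split <;> omega
      · by_cases h45 : p.1 = 4 ∨ p.1 = 5
        · rw [show pvStepA tol (L, c) p = (L, c) by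
              simp [pvStepA, h0, h12, h45],
            show pvStepB tol (done, cur) p = (done, cur) by
              simp [pvStepB, h0, h12, h45]]
          exact ih done cur L c hL hc hinv
        · -- reset branch
          rw [show pvStepA tol (L, c) p = (if (0:Int) > L then 0 else L, 0) by
              simp [pvStepA, h0, h12, h45],
            show pvStepB tol (done, cur) p = (done ++ [cur], []) by
              simp [pvStepB, h0, h12, h45]]
          apply ih
          · split <;> omega
          · simp
          · rw [List.map_append, List.map_cons, List.map_nil,
              foldl_max_zero_append]
            have : pvMaxPrefix ([] : List Int) = 0 := by decide
            rw [this]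
            split
            · omega
            · omega

-- ===== VERDICT (by name: the statement is the Claim_ definition above) =====
theorem longest_contiguous_len_spec : Claim_equal_longest_contiguous_len := by
  intro cig tol _
  unfold Spec_longest_contiguous_len longest_contiguous_len longest_contiguous_len_alt
  cases cig with
  | nil => rfl
  | cons p rest =>
    simp only [reduceCtorEq, if_false]
    exact loop_inv (p :: rest) tol [] [] 0 0 le_rfl (by simp) (by decide)
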